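-- pv_equiv track=rewrite | github.com/Chris-Lehnen-ICT-CONSULTING/Definitie-app-zakelijk | src/hybrid_context/smart_source_selector.py | _identify_topic_focus
-- ===== SOURCE A (Python) =====
-- def _identify_topic_focus(keywords: list[str], concepts: list[str]) -> str:
--     """Identificeer hoofdonderwerp focus."""
--     # Strafrecht focus
--     strafrecht_terms = [
--         "straf",
--         "politie",
--         "openbaar",
--         "ministerie",
--         "gevangenis",
--         "reclassering",
--     ]
--     strafrecht_score = sum(
--         1 for term in strafrecht_terms if any(term in kw.lower() for kw in keywords)
--     )
--
--     # Identiteit focus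
--     identiteit_terms = [
--         "identiteit",
--         "authenticatie",
--         "verificatie",
--         "identiteitsbewijs",
--         "identificatie",
--     ]
--     identiteit_score = sum(
--         1 for term in identiteit_terms if any(term in kw.lower() for kw in keywords)
--     )
--
--     # Administratief focus
--     admin_terms = ["administratie", "registratie", "beheer", "systeem", "gegevens"]
--     admin_score = sum(
--         1 for term in admin_terms if any(term in kw.lower() for kw in keywords)
--     )
--
--     if identiteit_score > max(strafrecht_score, admin_score):
--         return "identity"
--     if strafrecht_score > admin_score:
--         return "criminal_law"
--     if admin_score > 0:
--         return "administrative"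
--     return "general"
-- ===== SOURCE B (Python) =====
-- def _identify_topic_focus(keywords: list[str], concepts: list[str]) -> str:
--     """Identificeer hoofdonderwerp focus."""
--     strafrecht_terms = [
--         "straf",
--         "politie",
--         "openbaar",
--         "ministerie",
--         "gevangenis",
--         "reclassering",
--     ]
--     identiteit_terms = [
--         "identiteit",
--         "authenticatie",
--         "verificatie",
--         "identiteitsbewijs",
--         "identificatie",
--     ]
--     admin_terms = ["administratie", "registratie", "beheer", "systeem", "gegevens"]
--
--     # One pass over the keywords: lower each keyword once and collect, per group,
--     # the set of terms it matches; a group's score is the size of its matched set.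
--     straf_hit: set[str] = set()
--     ident_hit: set[str] = set()
--     admin_hit: set[str] = set()
--     for kw in keywords:
--         low = kw.lower()
--         for term in strafrecht_terms:
--             if term in low:
--                 straf_hit.add(term)
--         for term in identiteit_terms:
--             if term in low:
--                 ident_hit.add(term)
--         for term in admin_terms:
--             if term in low:
--                 admin_hit.add(term)
--
--     strafrecht_score = len(straf_hit)
--     identiteit_score = len(ident_hit)
--     admin_score = len(admin_hit)
--
--     if identiteit_score > max(strafrecht_score, admin_score):
--         return "identity"
--     if strafrecht_score > admin_score:
--         return "criminal_law"
--     if admin_score > 0: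
--         return "administrative"
--     return "general"
-- ===== Notes on version B (the rewrite author's own statement) =====
-- stated objective: alternative
-- what changed: A makes three term-driven passes, re-lowering every keyword for each of the 16 terms; B makes a single pass over the keywords, lowering each keyword once and accumulating per-group sets of matched terms whose sizes are the scores.
import Mathlib
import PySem

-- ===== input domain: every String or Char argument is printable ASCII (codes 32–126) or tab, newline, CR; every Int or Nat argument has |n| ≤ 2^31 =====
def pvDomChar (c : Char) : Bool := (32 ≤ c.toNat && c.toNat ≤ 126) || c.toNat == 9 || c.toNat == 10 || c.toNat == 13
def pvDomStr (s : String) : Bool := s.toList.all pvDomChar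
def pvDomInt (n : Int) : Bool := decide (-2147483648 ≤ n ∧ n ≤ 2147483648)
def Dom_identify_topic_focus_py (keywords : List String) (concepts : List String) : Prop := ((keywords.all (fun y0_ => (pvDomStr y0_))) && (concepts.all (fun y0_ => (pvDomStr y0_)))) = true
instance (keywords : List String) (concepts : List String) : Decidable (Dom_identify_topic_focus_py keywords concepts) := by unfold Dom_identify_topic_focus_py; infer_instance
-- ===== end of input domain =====

-- B replaces A's three term-driven scans (which re-lower every keyword for each term)
-- by one pass over the keywords that lowers each keyword once and accumulates per-group
-- sets of matched terms; the scores are the set sizes (objective: alternative).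


-- ===== PORT A =====
-- sum(1 for term in terms if any(term in kw.lower() for kw in keywords))
def pvTermHit (keywords : List String) (term : String) : Bool :=
  keywords.any (fun kw => PySem.Str.isIn term (PySem.Str.lower kw))

def pvScoreA (terms : List String) (keywords : List String) : Int :=
  terms.foldl (fun acc term => if pvTermHit keywords term then acc + 1 else acc) 0

def identify_topic_focus_py (keywords : List String) (concepts : List String) : String :=
  let strafrecht_terms : List String :=
    ["straf", "politie", "openbaar", "ministerie", "gevangenis", "reclassering"]
  let strafrecht_score := pvScoreA strafrecht_terms keywords
  let identiteit_terms : List String :=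
    ["identiteit", "authenticatie", "verificatie", "identiteitsbewijs", "identificatie"]
  let identiteit_score := pvScoreA identiteit_terms keywords
  let admin_terms : List String :=
    ["administratie", "registratie", "beheer", "systeem", "gegevens"]
  let admin_score := pvScoreA admin_terms keywords
  if identiteit_score > max strafrecht_score admin_score then "identity"
  else if strafrecht_score > admin_score then "criminal_law"
  else if admin_score > 0 then "administrative"
  else "general"

-- ===== PORT B =====
-- inner loop of B: 'for term in terms: if term in low: hit.add(term)'
def pvGroupStep (low : String) (terms : List String) (s : PySem.Set String) : PySem.Set String :=
  terms.foldl (fun s term => if PySem.Str.isIn term low then PySem.Set.add s term else s) s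

def identify_topic_focus_py_alt (keywords : List String) (concepts : List String) : String :=
  let strafrecht_terms : List String :=
    ["straf", "politie", "openbaar", "ministerie", "gevangenis", "reclassering"]
  let identiteit_terms : List String :=
    ["identiteit", "authenticatie", "verificatie", "identiteitsbewijs", "identificatie"]
  let admin_terms : List String :=
    ["administratie", "registratie", "beheer", "systeem", "gegevens"]
  let final := keywords.foldl
    (fun (st : PySem.Set String × PySem.Set String × PySem.Set String) kw =>
      let low := PySem.Str.lower kw
      (pvGroupStep low strafrecht_terms st.1,
       pvGroupStep low identiteit_terms st.2.1,
       pvGroupStep low admin_terms st.2.2))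
    (PySem.Set.empty, PySem.Set.empty, PySem.Set.empty)
  let strafrecht_score : Int := PySem.Set.len final.1
  let identiteit_score : Int := PySem.Set.len final.2.1
  let admin_score : Int := PySem.Set.len final.2.2
  if identiteit_score > max strafrecht_score admin_score then "identity"
  else if strafrecht_score > admin_score then "criminal_law"
  else if admin_score > 0 then "administrative"
  else "general"

-- ===== PRECONDITION & SPEC =====
def Spec_identify_topic_focus_py (keywords : List String) (concepts : List String) (out : String) : Prop := out = identify_topic_focus_py_alt keywords concepts
instance (keywords : List String) (concepts : List String) (out : String) : Decidable (Spec_identify_topic_focus_py keywords concepts out) := by unfold Spec_identify_topic_focus_py; infer_instance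

-- ===== CLAIM (what is proved, stated in full; the proofs are below) =====
def Claim_equal_identify_topic_focus_py : Prop := ∀ (keywords : List String) (concepts : List String), Dom_identify_topic_focus_py keywords concepts → Spec_identify_topic_focus_py keywords concepts (identify_topic_focus_py keywords concepts)

-- ===== LEMMAS AND PROOFS =====

theorem pvTriple_proj (T1 T2 T3 : List String) (keywords : List String)
    (a b c : PySem.Set String) :
    keywords.foldl
      (fun (st : PySem.Set String × PySem.Set String × PySem.Set String) kw =>
        let low := PySem.Str.lower kw
        (pvGroupStep low T1 st.1, pvGroupStep low T2 st.2.1, pvGroupStep low T3 st.2.2))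
      (a, b, c)
    = (keywords.foldl (fun s kw => pvGroupStep (PySem.Str.lower kw) T1 s) a,
       keywords.foldl (fun s kw => pvGroupStep (PySem.Str.lower kw) T2 s) b,
       keywords.foldl (fun s kw => pvGroupStep (PySem.Str.lower kw) T3 s) c) := by
  induction keywords generalizing a b c with
  | nil => rfl
  | cons kw rest ih => simp [List.foldl, ih]

theorem pvGroupStep_mem (low : String) (terms : List String) (s : PySem.Set String)
    (x : String) :
    x ∈ pvGroupStep low terms s ↔ x ∈ s ∨ (x ∈ terms ∧ PySem.Str.isIn x low = true) := by
  induction terms generalizing s with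
  | nil => simp [pvGroupStep]
  | cons t rest ih =>
    simp only [pvGroupStep, List.foldl] at *
    by_cases h : PySem.Str.isIn t low = true
    · simp only [h, if_pos]
      rw [ih]
      simp only [PySem.Set.mem_add, List.mem_cons]
      constructor
      · rintro ((hs | he) | ⟨hm, hi⟩)
        · exact Or.inl hs
        · exact Or.inr ⟨Or.inl he, he ▸ h⟩
        · exact Or.inr ⟨Or.inr hm, hi⟩
      · rintro (hs | ⟨(he | hm), hi⟩)
        · exact Or.inl (Or.inl hs)
        · exact Or.inl (Or.inr he)
        · exact Or.inr ⟨hm, hi⟩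
    · simp only [h, if_neg, Bool.false_eq_true, not_false_iff]
      rw [ih]
      simp only [List.mem_cons]
      constructor
      · rintro (hs | ⟨hm, hi⟩)
        · exact Or.inl hs
        · exact Or.inr ⟨Or.inr hm, hi⟩
      · rintro (hs | ⟨(he | hm), hi⟩)
        · exact Or.inl hs
        · exact absurd (he ▸ hi) h
        · exact Or.inr ⟨hm, hi⟩

theorem pvGroupStep_nodup (low : String) (terms : List String) (s : PySem.Set String)
    (hs : s.Nodup) : (pvGroupStep low terms s).Nodup := by
  induction terms generalizing s with
  | nil => exact hs
  | cons t rest ih =>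
    simp only [pvGroupStep, List.foldl]
    split
    · exact ih _ (PySem.Set.nodup_add s t hs)
    · exact ih _ hs

theorem pvMatched_aux_mem (terms keywords : List String) (s : PySem.Set String) (x : String) :
    x ∈ keywords.foldl (fun s kw => pvGroupStep (PySem.Str.lower kw) terms s) s ↔
      x ∈ s ∨ (x ∈ terms ∧ ∃ kw ∈ keywords, PySem.Str.isIn x (PySem.Str.lower kw) = true) := by
  induction keywords generalizing s with
  | nil => simp
  | cons kw rest ih =>
    simp only [List.foldl]
    rw [ih, pvGroupStep_mem]
    simp only [List.mem_cons]
    constructor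
    · rintro ((hs | ⟨hm, hi⟩) | ⟨hm, k, hk, hi⟩)
      · exact Or.inl hs
      · exact Or.inr ⟨hm, kw, Or.inl rfl, hi⟩
      · exact Or.inr ⟨hm, k, Or.inr hk, hi⟩
    · rintro (hs | ⟨hm, k, (rfl | hk), hi⟩)
      · exact Or.inl (Or.inl hs)
      · exact Or.inl (Or.inr ⟨hm, hi⟩)
      · exact Or.inr ⟨hm, k, hk, hi⟩

theorem pvMatched_aux_nodup (terms keywords : List String) (s : PySem.Set String)
    (hs : s.Nodup) :
    (keywords.foldl (fun s kw => pvGroupStep (PySem.Str.lower kw) terms s) s).Nodup := by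
  induction keywords generalizing s with
  | nil => exact hs
  | cons kw rest ih => exact ih _ (pvGroupStep_nodup _ _ _ hs)

-- the core bridge: A's count of hit terms = size of B's matched set
theorem pvScoreA_eq_len (terms keywords : List String) (hnd : terms.Nodup) :
    pvScoreA terms keywords
      = PySem.Set.len (keywords.foldl (fun s kw => pvGroupStep (PySem.Str.lower kw) terms s)
          PySem.Set.empty) := by
  have hperm : (keywords.foldl (fun s kw => pvGroupStep (PySem.Str.lower kw) terms s)
      PySem.Set.empty).Perm (terms.filter (pvTermHit keywords)) := by
    rw [List.perm_ext_iff_of_nodup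
      (pvMatched_aux_nodup terms keywords PySem.Set.empty List.nodup_nil)
      (hnd.filter _)]
    intro x
    rw [pvMatched_aux_mem, List.mem_filter]
    simp [PySem.Set.empty, pvTermHit, List.any_eq_true]
  rw [pvScoreA, PySem.List.foldl_count_if, List.countP_eq_length_filter,
    PySem.Set.len, hperm.length_eq]
  simp

-- ===== VERDICT (by name: the statement is the Claim_ definition above) =====
theorem identify_topic_focus_py_spec : Claim_equal_identify_topic_focus_py := by
  intro keywords concepts _
  unfold Spec_identify_topic_focus_py
  simp only [identify_topic_focus_py, identify_topic_focus_py_alt, pvTriple_proj]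
  rw [← pvScoreA_eq_len ["straf", "politie", "openbaar", "ministerie", "gevangenis", "reclassering"] keywords (by decide),
    ← pvScoreA_eq_len ["identiteit", "authenticatie", "verificatie", "identiteitsbewijs", "identificatie"] keywords (by decide),
    ← pvScoreA_eq_len ["administratie", "registratie", "beheer", "systeem", "gegevens"] keywords (by decide)]
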